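-- pv_equiv track=rewrite | github.com/alexognyanov1/openlifter-parser | main2.py | group_athletes
-- ===== SOURCE A (Python) =====
-- def group_athletes(athletes_by_name):
--     """
--     Group athletes by (Sex, WeightClassKg, Division).
--     """
--     groups = {}
--     for athlete in athletes_by_name.values():
--         sex = athlete.get("Sex", "").strip()
--         weightclass = athlete.get("WeightClassKg", "").strip()
--         division = athlete.get("Division", "").strip()
--         key = (sex, weightclass, division)
--         groups.setdefault(key, []).append(athlete)
--     return groups
-- ===== SOURCE B (Python) =====
-- def group_athletes(athletes_by_name):
--     """
--     Group athletes by (Sex, WeightClassKg, Division): collect the distinct keys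
--     in first-occurrence order, then build each group by filtering the athletes.
--     """
--     athletes = list(athletes_by_name.values())
--
--     def key(a):
--         return (a.get("Sex", "").strip(),
--                 a.get("WeightClassKg", "").strip(),
--                 a.get("Division", "").strip())
--
--     keys = list(dict.fromkeys(key(a) for a in athletes))
--     return {k: [a for a in athletes if key(a) == k] for k in keys}
-- ===== Notes on version B (the rewrite author's own statement) =====
-- stated objective: alternative
-- what changed: Instead of one pass mutating a dict with setdefault/append, B first dedups the list of keys in first-occurrence order and then builds each group with a per-key filter comprehension.
import Mathlib
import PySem

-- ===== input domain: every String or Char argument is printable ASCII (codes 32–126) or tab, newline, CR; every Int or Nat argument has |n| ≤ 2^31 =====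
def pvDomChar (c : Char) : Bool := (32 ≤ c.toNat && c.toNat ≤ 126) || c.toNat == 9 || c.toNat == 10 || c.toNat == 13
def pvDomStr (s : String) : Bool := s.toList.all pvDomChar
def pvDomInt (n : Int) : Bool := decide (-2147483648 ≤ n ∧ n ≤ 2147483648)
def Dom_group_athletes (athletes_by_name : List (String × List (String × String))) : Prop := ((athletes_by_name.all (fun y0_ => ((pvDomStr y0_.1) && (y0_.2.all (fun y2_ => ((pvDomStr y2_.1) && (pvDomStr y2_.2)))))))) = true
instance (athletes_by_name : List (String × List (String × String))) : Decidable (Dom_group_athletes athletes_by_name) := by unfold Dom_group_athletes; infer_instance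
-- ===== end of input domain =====

-- B replaces A's single-pass setdefault/append dict mutation with a two-pass scheme
-- (dedup the key list, then one filter per key); same return value, no speed claim.

-- ===== PORT A =====
def group_athletes (athletes_by_name : List (String × List (String × String))) : List (String × String × String × List (List (String × String))) :=
  let groups : PySem.Dict (String × String × String) (List (List (String × String))) :=
    (PySem.Dict.ofList athletes_by_name).values.foldl (fun groups athlete =>
      let sex := PySem.Str.strip ((PySem.Dict.ofList athlete).getD "Sex" "")
      let weightclass := PySem.Str.strip ((PySem.Dict.ofList athlete).getD "WeightClassKg" "")
      let division := PySem.Str.strip ((PySem.Dict.ofList athlete).getD "Division" "")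
      let key := (sex, weightclass, division)
      -- groups.setdefault(key, []).append(athlete) : append to the entry, creating it as [] first
      groups.modify key [] (· ++ [athlete])) PySem.Dict.empty
  groups.items.map (fun p => (p.1.1, p.1.2.1, p.1.2.2, p.2))

-- ===== PORT B =====
-- Source B's local helper key(a)
def pvKeyB (athlete : List (String × String)) : String × String × String :=
  (PySem.Str.strip ((PySem.Dict.ofList athlete).getD "Sex" ""),
   PySem.Str.strip ((PySem.Dict.ofList athlete).getD "WeightClassKg" ""),
   PySem.Str.strip ((PySem.Dict.ofList athlete).getD "Division" ""))

def group_athletes_alt (athletes_by_name : List (String × List (String × String))) : List (String × String × String × List (List (String × String))) :=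
  let athletes := (PySem.Dict.ofList athletes_by_name).values
  let keys := PySem.List.dedup (athletes.map pvKeyB)
  keys.map (fun k => (k.1, k.2.1, k.2.2, athletes.filter (fun a => pvKeyB a == k)))

-- ===== PRECONDITION & SPEC =====
def Spec_group_athletes (athletes_by_name : List (String × List (String × String))) (out : List (String × String × String × List (List (String × String)))) : Prop := out = group_athletes_alt athletes_by_name
instance (athletes_by_name : List (String × List (String × String))) (out : List (String × String × String × List (List (String × String)))) : Decidable (Spec_group_athletes athletes_by_name out) := by
  unfold Spec_group_athletes
  -- depth-3 product DecidableEq is not found by synthesis here; build it stepwise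
  letI : DecidableEq (String × List (List (String × String))) := instDecidableEqProd
  letI : DecidableEq (String × String × List (List (String × String))) := instDecidableEqProd
  letI : DecidableEq (String × String × String × List (List (String × String))) := instDecidableEqProd
  exact List.hasDecEq _ _

-- ===== CLAIM (what is proved, stated in full; the proofs are below) =====
def Claim_equal_group_athletes : Prop := ∀ (athletes_by_name : List (String × List (String × String))), Dom_group_athletes athletes_by_name → Spec_group_athletes athletes_by_name (group_athletes athletes_by_name)

-- ===== LEMMAS AND PROOFS =====

-- A's grouping loop, characterised: its items list is B's dedup-keys map.
theorem pv_groups_items (l : List (List (String × String))) :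
    (l.foldl (fun (groups : PySem.Dict (String × String × String) (List (List (String × String)))) athlete =>
        groups.modify (pvKeyB athlete) [] (· ++ [athlete])) PySem.Dict.empty).items
    = (PySem.List.dedup (l.map pvKeyB)).map
        (fun k => (k, l.filter (fun a => pvKeyB a == k))) := by
  set G := l.foldl (fun (groups : PySem.Dict (String × String × String) (List (List (String × String)))) athlete =>
      groups.modify (pvKeyB athlete) [] (· ++ [athlete])) PySem.Dict.empty with hG
  have hkeys : G.keys = PySem.List.dedup (l.map pvKeyB) := by
    rw [hG, PySem.Dict.keys_foldl_modify_key (f := fun _ a => (· ++ [a]))]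
    simp [PySem.Dict.keys_empty, PySem.List.dedup_eq_ofList, PySem.Set.ofList_eq_foldl,
      PySem.Set.update]
  have hnd : G.keys.Nodup := by
    rw [hkeys]; exact PySem.List.nodup_dedup _
  have hget : ∀ k, G.getD k [] = l.filter (fun a => pvKeyB a == k) := by
    intro k
    have hmap : G = (l.map (fun a => (pvKeyB a, a))).foldl
        (fun (d : PySem.Dict (String × String × String) (List (List (String × String)))) p =>
          d.modify p.1 [] (· ++ [p.2])) PySem.Dict.empty := by
      rw [hG, List.foldl_map]
    rw [hmap, PySem.Dict.getD_foldl_modify_append]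
    simp [PySem.Dict.getD_empty, List.filter_map, Function.comp_def]
  rw [PySem.Dict.items_eq_map_keys G hnd [], hkeys]
  exact List.map_congr_left (fun k _ => by rw [hget k])

-- ===== VERDICT (by name: the statement is the Claim_ definition above) =====
theorem group_athletes_spec : Claim_equal_group_athletes := by
  intro abn _
  show group_athletes abn = group_athletes_alt abn
  unfold group_athletes group_athletes_alt
  rw [show (fun (groups : PySem.Dict (String × String × String) (List (List (String × String)))) athlete =>
        let sex := PySem.Str.strip ((PySem.Dict.ofList athlete).getD "Sex" "")
        let weightclass := PySem.Str.strip ((PySem.Dict.ofList athlete).getD "WeightClassKg" "")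
        let division := PySem.Str.strip ((PySem.Dict.ofList athlete).getD "Division" "")
        let key := (sex, weightclass, division)
        groups.modify key [] (· ++ [athlete]))
      = (fun groups athlete => groups.modify (pvKeyB athlete) [] (· ++ [athlete])) from rfl]
  simp only [pv_groups_items, List.map_map, Function.comp_def]
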